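-- pv_equiv track=rewrite | github.com/juanauli/Inversion-Sequences-Consecutive-Patterns-of-Relations | count_consec_ineq3.py | count_great_less
-- ===== SOURCE A (Python) =====
-- def count_great_less(sequence):
--     index = 0
--     counter = 0
--     while index < len(sequence) - 2:
--         if sequence[index] > sequence[index + 1] < sequence[index + 2]:
--             counter += 1
--         index += 1
--     return counter
-- ===== SOURCE B (Python) =====
-- def count_great_less(sequence):
--     # Pass 1: relation table of adjacent pairs: -1 descent, +1 ascent, 0 equal.
--     rels = []
--     for a, b in zip(sequence, sequence[1:]):
--         rels.append(-1 if a > b else (1 if a < b else 0))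
--     # Pass 2: count consecutive descent-then-ascent positions (valleys).
--     count = 0
--     for x, y in zip(rels, rels[1:]):
--         if x == -1 and y == 1:
--             count += 1
--     return count
-- ===== Notes on version B (the rewrite author's own statement) =====
-- stated objective: alternative
-- what changed: Replaced the single index-based sliding-window while loop by a two-pass decomposition: first build the list of adjacent-pair relations (-1/0/+1), then count consecutive descent-ascent pairs in that relation list; iterating with zip instead of repeated subscripting is the constant-factor speed mechanism.
import Mathlib
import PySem

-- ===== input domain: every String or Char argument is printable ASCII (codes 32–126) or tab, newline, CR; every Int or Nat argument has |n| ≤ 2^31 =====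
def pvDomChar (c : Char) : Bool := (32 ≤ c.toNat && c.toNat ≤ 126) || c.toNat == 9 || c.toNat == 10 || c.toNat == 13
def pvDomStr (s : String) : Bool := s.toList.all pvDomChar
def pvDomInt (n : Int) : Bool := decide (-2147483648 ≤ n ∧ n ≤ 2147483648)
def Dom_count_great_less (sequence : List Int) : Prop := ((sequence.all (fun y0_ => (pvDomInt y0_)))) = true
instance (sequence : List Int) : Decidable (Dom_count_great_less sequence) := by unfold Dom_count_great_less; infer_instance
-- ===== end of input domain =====

-- B replaces the single index-window while loop by a two-pass decomposition
-- (relation table, then count consecutive descent-ascent); objective: alternative.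

-- ===== PORT A =====
-- while-loop of A, step for step; indices are always in range, default never used
def count_great_lessLoop (s : List Int) (index counter : Int) : Int :=
  if index < (s.length : Int) - 2 then
    count_great_lessLoop s (index + 1)
      (if PySem.List.pyGetD s index 0 > PySem.List.pyGetD s (index + 1) 0 ∧
          PySem.List.pyGetD s (index + 1) 0 < PySem.List.pyGetD s (index + 2) 0
       then counter + 1 else counter)
  else counter
termination_by ((s.length : Int) - 2 - index).toNat
decreasing_by omega

def count_great_less (sequence : List Int) : Int :=
  count_great_lessLoop sequence 0 0

-- ===== PORT B =====
-- sequence[1:] is ported as List.drop 1 (exact: slice from nonnegative start)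
def count_great_less_alt (sequence : List Int) : Int :=
  let rels : List Int :=
    (sequence.zip (sequence.drop 1)).map
      (fun p => if p.1 > p.2 then (-1 : Int) else if p.1 < p.2 then 1 else 0)
  (rels.zip (rels.drop 1)).foldl
    (fun count p => if p.1 = -1 ∧ p.2 = 1 then count + 1 else count) 0

-- ===== PRECONDITION & SPEC =====
def Spec_count_great_less (sequence : List Int) (out : Int) : Prop := out = count_great_less_alt sequence
instance (sequence : List Int) (out : Int) : Decidable (Spec_count_great_less sequence out) := by unfold Spec_count_great_less; infer_instance

-- ===== CLAIM (what is proved, stated in full; the proofs are below) =====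
def Claim_equal_count_great_less : Prop := ∀ (sequence : List Int), Dom_count_great_less sequence → Spec_count_great_less sequence (count_great_less sequence)

-- ===== LEMMAS AND PROOFS =====

/-- canonical valley count, structural recursion -/
def pvValleys : List Int → Int
  | a :: b :: c :: t => (if a > b ∧ b < c then 1 else 0) + pvValleys (b :: c :: t)
  | _ => 0

lemma pvValleys_short (l : List Int) (h : l.length ≤ 2) : pvValleys l = 0 := by
  match l with
  | [] => rfl
  | [_] => rfl
  | [_, _] => rfl
  | _ :: _ :: _ :: _ => simp at h

lemma pvLoop_eq (s : List Int) (n i : Nat) (c : Int) (hn : s.length ≤ i + n) :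
    count_great_lessLoop s (i : Int) c = c + pvValleys (s.drop i) := by
  induction n generalizing i c with
  | zero =>
      rw [count_great_lessLoop]
      have h1 : ¬ ((i : Int) < (s.length : Int) - 2) := by omega
      rw [if_neg h1, pvValleys_short _ (by simp; omega)]
      ring
  | succ n ih =>
      rw [count_great_lessLoop]
      by_cases h : (i : Int) < (s.length : Int) - 2
      · rw [if_pos h]
        have h0 : i < s.length := by omega
        have h1 : i + 1 < s.length := by omega
        have h2 : i + 2 < s.length := by omega
        have e0 : PySem.List.pyGetD s (i : Int) 0 = s[i] := by
          rw [PySem.List.pyGetD_natCast]; simp [h0]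
        have e1 : PySem.List.pyGetD s ((i : Int) + 1) 0 = s[i + 1] := by
          have : ((i : Int) + 1) = ((i + 1 : Nat) : Int) := by push_cast; ring
          rw [this, PySem.List.pyGetD_natCast]; simp [h1]
        have e2 : PySem.List.pyGetD s ((i : Int) + 2) 0 = s[i + 2] := by
          have : ((i : Int) + 2) = ((i + 2 : Nat) : Int) := by push_cast; ring
          rw [this, PySem.List.pyGetD_natCast]; simp [h2]
        have hd0 : s.drop i = s[i] :: s.drop (i + 1) := List.drop_eq_getElem_cons h0
        have hd1 : s.drop (i + 1) = s[i + 1] :: s.drop (i + 2) := List.drop_eq_getElem_cons h1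
        have hd2 : s.drop (i + 2) = s[i + 2] :: s.drop (i + 3) := List.drop_eq_getElem_cons h2
        have hcast : (i : Int) + 1 = ((i + 1 : Nat) : Int) := by push_cast; ring
        rw [e0, e1, e2, hcast, ih (i + 1) _ (by omega)]
        rw [hd0, hd1, hd2]
        rw [show pvValleys (s[i] :: s[i+1] :: s[i+2] :: s.drop (i+3))
              = (if s[i] > s[i+1] ∧ s[i+1] < s[i+2] then 1 else 0)
                + pvValleys (s[i+1] :: s[i+2] :: s.drop (i+3)) from rfl]
        split_ifs <;> ring
      · rw [if_neg h, pvValleys_short _ (by simp; omega)]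
        ring

lemma pvA_eq_valleys (s : List Int) : count_great_less s = pvValleys s := by
  have := pvLoop_eq s s.length 0 0 (by omega)
  simpa [count_great_less] using this

/-- adjacent-pair count of the relation list, structural recursion -/
def pvPCount : List Int → Int
  | x :: y :: t => (if x = -1 ∧ y = 1 then 1 else 0) + pvPCount (y :: t)
  | _ => 0

lemma pvFold_eq (l : List Int) (c : Int) :
    (l.zip (l.drop 1)).foldl
      (fun count p => if p.1 = -1 ∧ p.2 = 1 then count + 1 else count) c
    = c + pvPCount l := by
  induction l generalizing c with
  | nil => simp [pvPCount]
  | cons x t ih =>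
      match t with
      | [] => simp [pvPCount]
      | y :: t' =>
          simp only [List.drop_succ_cons, List.drop_zero, List.zip_cons_cons, List.foldl_cons]
          rw [show (y :: t').drop 1 = t' from rfl] at ih
          rw [ih]
          show _ = c + ((if x = -1 ∧ y = 1 then 1 else 0) + pvPCount (y :: t'))
          split_ifs <;> ring

def pvRel (a b : Int) : Int := if a > b then -1 else if a < b then 1 else 0

lemma pvRelMap_cons (a b : Int) (t : List Int) :
    ((a :: b :: t).zip ((a :: b :: t).drop 1)).map (fun p => pvRel p.1 p.2)
    = pvRel a b :: ((b :: t).zip ((b :: t).drop 1)).map (fun p => pvRel p.1 p.2) := rfl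

lemma pvPCount_relmap (s : List Int) :
    pvPCount ((s.zip (s.drop 1)).map (fun p => pvRel p.1 p.2)) = pvValleys s := by
  induction s with
  | nil => rfl
  | cons a t ih =>
      match t with
      | [] => rfl
      | [b] => rfl
      | b :: c :: t' =>
          rw [pvRelMap_cons a b]
          rw [pvRelMap_cons b c] at ih ⊢
          rw [show pvPCount (pvRel a b :: pvRel b c :: _)
                = (if pvRel a b = -1 ∧ pvRel b c = 1 then 1 else 0)
                  + pvPCount (pvRel b c :: ((c :: t').zip ((c :: t').drop 1)).map (fun p => pvRel p.1 p.2)) from rfl]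
          rw [ih]
          rw [show pvValleys (a :: b :: c :: t')
                = (if a > b ∧ b < c then 1 else 0) + pvValleys (b :: c :: t') from rfl]
          congr 1
          have h1 : (pvRel a b = -1) ↔ a > b := by
            unfold pvRel; split_ifs <;> simp <;> omega
          have h2 : (pvRel b c = 1) ↔ b < c := by
            unfold pvRel; split_ifs <;> simp <;> omega
          simp [h1, h2]

lemma pvB_eq_valleys (s : List Int) : count_great_less_alt s = pvValleys s := by
  unfold count_great_less_alt
  rw [show (fun p : Int × Int => if p.1 > p.2 then (-1 : Int) else if p.1 < p.2 then 1 else 0)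
        = (fun p : Int × Int => pvRel p.1 p.2) from rfl]
  rw [pvFold_eq, pvPCount_relmap]
  ring

-- ===== VERDICT (by name: the statement is the Claim_ definition above) =====
theorem count_great_less_spec : Claim_equal_count_great_less := by
  intro s _
  unfold Spec_count_great_less
  rw [pvA_eq_valleys, pvB_eq_valleys]
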